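-- pv_equiv track=rewrite | github.com/rileyseefeldt/angr | angr/engines/icicle.py | _effective_segment_prefix
-- ===== SOURCE A (Python) =====
-- _X86_LEGACY_PREFIXES = frozenset({0x26, 0x2E, 0x36, 0x3E, 0x64, 0x65, 0x66, 0x67, 0xF0, 0xF2, 0xF3})
--
-- _X86_SEGMENT_PREFIXES = frozenset({0x26, 0x2E, 0x36, 0x3E, 0x64, 0x65})
--
-- def _effective_segment_prefix(insn_bytes) -> int | None:
--     """Return the last (effective) segment-override prefix, or None."""
--     last_seg = None
--     for byte in insn_bytes:
--         if byte in _X86_SEGMENT_PREFIXES: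
--             last_seg = byte
--         elif byte not in _X86_LEGACY_PREFIXES:
--             # REX (0x40-0x4F) or opcode — segment overrides must precede REX,
--             # so the last_seg we've seen is the effective one.
--             break
--     return last_seg
-- ===== SOURCE B (Python) =====
-- from itertools import takewhile
--
-- _X86_LEGACY_PREFIXES = frozenset({0x26, 0x2E, 0x36, 0x3E, 0x64, 0x65, 0x66, 0x67, 0xF0, 0xF2, 0xF3})
--
-- _X86_SEGMENT_PREFIXES = frozenset({0x26, 0x2E, 0x36, 0x3E, 0x64, 0x65})
--
-- def _effective_segment_prefix(insn_bytes):
--     """Two-phase: isolate the leading legacy-prefix run, then reverse-scan it."""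
--     run = list(takewhile(lambda b: b in _X86_LEGACY_PREFIXES, insn_bytes))
--     for b in reversed(run):
--         if b in _X86_SEGMENT_PREFIXES:
--             return b
--     return None
-- ===== Notes on version B (the rewrite author's own statement) =====
-- stated objective: alternative
-- what changed: Replaces A's single fused loop carrying a last-seen accumulator with a two-phase decomposition: take the maximal leading run of legacy-prefix bytes, then reverse-scan that run and return the first segment-prefix byte found.
import Mathlib
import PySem

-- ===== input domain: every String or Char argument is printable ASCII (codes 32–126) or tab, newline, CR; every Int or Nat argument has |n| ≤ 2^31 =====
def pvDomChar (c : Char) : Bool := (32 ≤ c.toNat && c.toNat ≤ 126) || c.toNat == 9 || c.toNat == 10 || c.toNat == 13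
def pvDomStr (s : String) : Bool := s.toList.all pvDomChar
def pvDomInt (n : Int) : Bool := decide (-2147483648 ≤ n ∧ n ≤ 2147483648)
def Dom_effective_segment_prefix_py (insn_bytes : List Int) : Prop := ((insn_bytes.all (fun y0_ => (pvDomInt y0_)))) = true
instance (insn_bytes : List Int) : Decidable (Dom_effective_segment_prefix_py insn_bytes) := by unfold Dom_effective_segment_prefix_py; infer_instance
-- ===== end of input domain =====

-- B is the same task by a different decomposition (leading legacy run, then reverse scan); return values proved equal.

-- ===== PORT A =====
def pvX86LegacyPrefixes : List Int := [0x26, 0x2E, 0x36, 0x3E, 0x64, 0x65, 0x66, 0x67, 0xF0, 0xF2, 0xF3]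
def pvX86SegmentPrefixes : List Int := [0x26, 0x2E, 0x36, 0x3E, 0x64, 0x65]

-- the for-loop of A: accumulator last_seg, break on non-legacy byte
def pvLoopA : Option Int → List Int → Option Int
  | acc, [] => acc
  | acc, b :: rest =>
    if b ∈ pvX86SegmentPrefixes then pvLoopA (some b) rest
    else if b ∉ pvX86LegacyPrefixes then acc
    else pvLoopA acc rest

def effective_segment_prefix_py (insn_bytes : List Int) : Option Int :=
  pvLoopA none insn_bytes

-- ===== PORT B =====
-- reverse scan of the run: first segment-prefix byte, like B's 'for b in reversed(run)'
def pvFindSegRev : List Int → Option Int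
  | [] => none
  | b :: rest => if b ∈ pvX86SegmentPrefixes then some b else pvFindSegRev rest

def effective_segment_prefix_py_alt (insn_bytes : List Int) : Option Int :=
  pvFindSegRev ((insn_bytes.takeWhile (fun b => decide (b ∈ pvX86LegacyPrefixes))).reverse)

-- ===== PRECONDITION & SPEC =====
def Spec_effective_segment_prefix_py (insn_bytes : List Int) (out : Option Int) : Prop := out = effective_segment_prefix_py_alt insn_bytes
instance (insn_bytes : List Int) (out : Option Int) : Decidable (Spec_effective_segment_prefix_py insn_bytes out) := by unfold Spec_effective_segment_prefix_py; infer_instance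

-- ===== CLAIM (what is proved, stated in full; the proofs are below) =====
def Claim_equal_effective_segment_prefix_py : Prop := ∀ (insn_bytes : List Int), Dom_effective_segment_prefix_py insn_bytes → Spec_effective_segment_prefix_py insn_bytes (effective_segment_prefix_py insn_bytes)

-- ===== LEMMAS AND PROOFS =====
theorem pvFindSegRev_append (l m : List Int) :
    pvFindSegRev (l ++ m) =
      match pvFindSegRev l with
      | some x => some x
      | none => pvFindSegRev m := by
  induction l with
  | nil => simp [pvFindSegRev]
  | cons b t ih =>
    by_cases hs : b ∈ pvX86SegmentPrefixes <;> simp [pvFindSegRev, hs, ih]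

theorem pvLoopA_eq (l : List Int) (acc : Option Int) :
    pvLoopA acc l =
      match pvFindSegRev ((l.takeWhile (fun b => decide (b ∈ pvX86LegacyPrefixes))).reverse) with
      | some x => some x
      | none => acc := by
  induction l generalizing acc with
  | nil => simp [pvLoopA, pvFindSegRev]
  | cons b t ih =>
    by_cases hs : b ∈ pvX86SegmentPrefixes
    · have hl : b ∈ pvX86LegacyPrefixes := by
        fin_cases hs <;> simp [pvX86LegacyPrefixes]
      rw [show pvLoopA acc (b :: t) = pvLoopA (some b) t from by simp [pvLoopA, hs],
        show (b :: t).takeWhile (fun b => decide (b ∈ pvX86LegacyPrefixes)) =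
          b :: t.takeWhile (fun b => decide (b ∈ pvX86LegacyPrefixes)) from by
            simp [hl],
        List.reverse_cons, pvFindSegRev_append, ih]
      cases pvFindSegRev ((t.takeWhile (fun b => decide (b ∈ pvX86LegacyPrefixes))).reverse) <;>
        simp [pvFindSegRev, hs]
    · by_cases hl : b ∈ pvX86LegacyPrefixes
      · rw [show pvLoopA acc (b :: t) = pvLoopA acc t from by simp [pvLoopA, hs, hl],
          show (b :: t).takeWhile (fun b => decide (b ∈ pvX86LegacyPrefixes)) =
            b :: t.takeWhile (fun b => decide (b ∈ pvX86LegacyPrefixes)) from by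
              simp [hl],
          List.reverse_cons, pvFindSegRev_append, ih]
        cases pvFindSegRev ((t.takeWhile (fun b => decide (b ∈ pvX86LegacyPrefixes))).reverse) <;>
          simp [pvFindSegRev, hs]
      · simp [pvLoopA, hs, hl, pvFindSegRev]

-- ===== VERDICT (by name: the statement is the Claim_ definition above) =====
theorem effective_segment_prefix_py_spec : Claim_equal_effective_segment_prefix_py := by
  intro insn_bytes _
  unfold Spec_effective_segment_prefix_py effective_segment_prefix_py effective_segment_prefix_py_alt
  rw [pvLoopA_eq]
  cases pvFindSegRev ((insn_bytes.takeWhile (fun b => decide (b ∈ pvX86LegacyPrefixes))).reverse) <;> rfl
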